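-- pv_equiv track=rewrite | github.com/cmbenello/141-discussion | solutions/strings_list_sols.py | sl_30_kth_non_overlapping
-- ===== SOURCE A (Python) =====
-- def sl_30_kth_non_overlapping(s: str, sub: str, k: int) -> int:
--     if not sub or k < 1:
--         return -1
--     start = 0
--     for _ in range(k):
--         idx = s.find(sub, start)
--         if idx == -1:
--             return -1
--         start = idx + len(sub)
--     return idx
-- ===== SOURCE B (Python) =====
-- def sl_30_kth_non_overlapping(s: str, sub: str, k: int) -> int:
--     if not sub or k < 1:
--         return -1
--     m = len(sub)
--     count = 0
--     i = 0
--     while i + m <= len(s):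
--         if s.startswith(sub, i):
--             count += 1
--             if count == k:
--                 return i
--             i += m
--         else:
--             i += 1
--     return -1
-- ===== Notes on version B (the rewrite author's own statement) =====
-- stated objective: alternative
-- what changed: Replaces the k repeated s.find calls with one explicit left-to-right scan that tests s.startswith(sub, i) at each position, counting non-overlapping matches and jumping by len(sub) on a match.
import Mathlib
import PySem

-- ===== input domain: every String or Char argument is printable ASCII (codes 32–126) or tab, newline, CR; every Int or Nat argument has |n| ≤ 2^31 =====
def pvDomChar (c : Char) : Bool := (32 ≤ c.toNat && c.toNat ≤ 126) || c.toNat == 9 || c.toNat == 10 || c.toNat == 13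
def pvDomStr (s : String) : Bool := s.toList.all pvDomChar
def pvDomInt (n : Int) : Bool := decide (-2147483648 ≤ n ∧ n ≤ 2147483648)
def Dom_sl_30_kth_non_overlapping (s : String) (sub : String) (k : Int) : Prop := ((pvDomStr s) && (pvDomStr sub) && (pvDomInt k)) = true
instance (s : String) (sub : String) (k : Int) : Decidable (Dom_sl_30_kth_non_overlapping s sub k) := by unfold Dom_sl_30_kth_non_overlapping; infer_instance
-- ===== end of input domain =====

-- B replaces A's k repeated s.find calls with a single explicit startswith scan; an alternative of similar cost, proved to return the same value.

-- ===== PORT A =====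
-- the `for _ in range(k)` loop: n iterations left, current `start`, current `idx`
def pvLoopA (cs sb : List Char) : Nat → Int → Int → Int
  | 0, _, idx => idx
  | n + 1, start, _ =>
    let i := PySem.Chars.findFrom cs sb start none
    if i = -1 then -1 else pvLoopA cs sb n (i + sb.length) i

def sl_30_kth_non_overlapping (s : String) (sub : String) (k : Int) : Int :=
  if sub.toList.length = 0 ∨ k < 1 then -1
  else pvLoopA s.toList sub.toList k.toNat 0 0

-- ===== PORT B =====
-- the `while i + m <= len(s)` scan; `startswith (cs.drop i) sb` is s.startswith(sub, i)
def pvLoopB (cs sb : List Char) (m : Nat) (hm : 0 < m) (k : Int) (count : Int) (i : Nat) : Int :=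
  if i + m ≤ cs.length then
    if PySem.Chars.startswith (cs.drop i) sb then
      if count + 1 = k then (i : Int)
      else pvLoopB cs sb m hm k (count + 1) (i + m)
    else pvLoopB cs sb m hm k count (i + 1)
  else -1
termination_by cs.length - i
decreasing_by all_goals omega

def sl_30_kth_non_overlapping_alt (s : String) (sub : String) (k : Int) : Int :=
  if h : sub.toList.length = 0 ∨ k < 1 then -1
  else pvLoopB s.toList sub.toList sub.toList.length (by omega) k 0 0

-- ===== PRECONDITION & SPEC =====
def Spec_sl_30_kth_non_overlapping (s : String) (sub : String) (k : Int) (out : Int) : Prop := out = sl_30_kth_non_overlapping_alt s sub k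
instance (s : String) (sub : String) (k : Int) (out : Int) : Decidable (Spec_sl_30_kth_non_overlapping s sub k out) := by unfold Spec_sl_30_kth_non_overlapping; infer_instance

-- ===== CLAIM (what is proved, stated in full; the proofs are below) =====
def Claim_equal_sl_30_kth_non_overlapping : Prop := ∀ (s : String) (sub : String) (k : Int), Dom_sl_30_kth_non_overlapping s sub k → Spec_sl_30_kth_non_overlapping s sub k (sl_30_kth_non_overlapping s sub k)

-- ===== LEMMAS AND PROOFS =====

-- prefix at a position ≥ p gives an occurrence inside cs.drop p
theorem pv_prefix_drop_infix (cs sb : List Char) (p q : Nat) (hpq : p ≤ q)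
    (h : sb <+: cs.drop q) : sb <:+: cs.drop p := by
  have hd : (cs.drop p).drop (q - p) = cs.drop q := by
    rw [List.drop_drop]; congr 1; omega
  exact (h.isInfix).trans (by rw [← hd]; exact (List.drop_suffix _ _).isInfix)

-- if sb occurs nowhere at or after p, the B scan from p returns -1
theorem pvLoopB_none (cs sb : List Char) (m : Nat) (hm : 0 < m) (k count : Int) (p : Nat)
    (hms : sb.length = m)
    (H : ∀ q, p ≤ q → ¬ sb <+: cs.drop q) :
    pvLoopB cs sb m hm k count p = -1 := by
  rw [pvLoopB]
  split
  · have hsw : PySem.Chars.startswith (cs.drop p) sb = false := by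
      rw [← Bool.not_eq_true, PySem.Chars.startswith_iff]
      exact H p le_rfl
    rw [hsw]
    simp only [Bool.false_eq_true, if_false]
    exact pvLoopB_none cs sb m hm k count (p + 1) hms (fun q hq => H q (by omega))
  · rfl
termination_by cs.length - p
decreasing_by omega

-- no occurrence at positions p..j-1: the B scan walks from p to j unchanged
theorem pvLoopB_skip (cs sb : List Char) (m : Nat) (hm : 0 < m) (k count : Int) (p j : Nat)
    (hpj : p ≤ j) (hjm : j + m ≤ cs.length) (hms : sb.length = m)
    (H : ∀ q, p ≤ q → q < j → ¬ sb <+: cs.drop q) :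
    pvLoopB cs sb m hm k count p = pvLoopB cs sb m hm k count j := by
  rcases Nat.eq_or_lt_of_le hpj with h | h
  · rw [h]
  · rw [pvLoopB]
    have hle : p + m ≤ cs.length := by omega
    have hsw : PySem.Chars.startswith (cs.drop p) sb = false := by
      rw [← Bool.not_eq_true, PySem.Chars.startswith_iff]
      exact H p le_rfl h
    rw [if_pos hle, hsw]
    simp only [Bool.false_eq_true, if_false]
    exact pvLoopB_skip cs sb m hm k count (p + 1) j (by omega) hjm hms
      (fun q hq hq' => H q (by omega) hq')
termination_by j - p
decreasing_by omega

-- main correspondence: n+1 occurrences still wanted, scanning/searching from position p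
theorem pv_main (cs sb : List Char) (m : Nat) (hm : 0 < m) (hms : sb.length = m) (k : Int) :
    ∀ (n p : Nat) (count idx : Int), p ≤ cs.length → count + (n + 1 : Nat) = k →
    pvLoopA cs sb (n + 1) (p : Int) idx = pvLoopB cs sb m hm k count p := by
  intro n
  induction n with
  | zero =>
    intro p count idx hp hcnt
    rw [pvLoopA]
    by_cases hneg : PySem.Chars.findFrom cs sb (p : Int) none = -1
    · rw [hneg]
      refine (pvLoopB_none cs sb m hm k count p hms ?_).symm
      intro q hq hpre
      exact (PySem.Chars.findFrom_natCast_eq_neg_one_iff cs sb p hp).mp hneg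
        (pv_prefix_drop_infix cs sb p q hq hpre)
    · obtain ⟨hge, hpre, hmin⟩ := PySem.Chars.findFrom_natCast_spec cs sb p hp hneg
      set f := PySem.Chars.findFrom cs sb (p : Int) none with hf
      have hf0 : 0 ≤ f := le_trans (by exact_mod_cast Nat.zero_le p) hge
      have hjm : f.toNat + m ≤ cs.length := by
        have := hpre.length_le
        simp [hms, List.length_drop] at this
        omega
      rw [if_neg hneg]
      rw [pvLoopB_skip cs sb m hm k count p f.toNat (by omega) hjm hms hmin]
      rw [pvLoopB]
      have hsw : PySem.Chars.startswith (cs.drop f.toNat) sb = true := by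
        rw [PySem.Chars.startswith_iff]; exact hpre
      rw [if_pos hjm, if_pos hsw, if_pos (show count + 1 = k by push_cast at hcnt; omega)]
      simp only [pvLoopA]
      omega
  | succ n ih =>
    intro p count idx hp hcnt
    rw [pvLoopA]
    by_cases hneg : PySem.Chars.findFrom cs sb (p : Int) none = -1
    · rw [hneg]
      refine (pvLoopB_none cs sb m hm k count p hms ?_).symm
      intro q hq hpre
      exact (PySem.Chars.findFrom_natCast_eq_neg_one_iff cs sb p hp).mp hneg
        (pv_prefix_drop_infix cs sb p q hq hpre)
    · obtain ⟨hge, hpre, hmin⟩ := PySem.Chars.findFrom_natCast_spec cs sb p hp hneg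
      set f := PySem.Chars.findFrom cs sb (p : Int) none with hf
      have hf0 : 0 ≤ f := le_trans (by exact_mod_cast Nat.zero_le p) hge
      have hjm : f.toNat + m ≤ cs.length := by
        have := hpre.length_le
        simp [hms, List.length_drop] at this
        omega
      rw [if_neg hneg]
      rw [pvLoopB_skip cs sb m hm k count p f.toNat (by omega) hjm hms hmin]
      rw [pvLoopB]
      have hsw : PySem.Chars.startswith (cs.drop f.toNat) sb = true := by
        rw [PySem.Chars.startswith_iff]; exact hpre
      rw [if_pos hjm, if_pos hsw, if_neg (show ¬ (count + 1 = k) by push_cast at hcnt; omega)]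
      have hstart : f + (sb.length : Int) = ((f.toNat + m : Nat) : Int) := by
        push_cast [hms]; omega
      rw [hstart]
      exact ih (f.toNat + m) (count + 1) f (by omega) (by push_cast at hcnt ⊢; omega)


-- ===== VERDICT (by name: the statement is the Claim_ definition above) =====
theorem sl_30_kth_non_overlapping_spec : Claim_equal_sl_30_kth_non_overlapping := by
  intro s sub k _
  unfold Spec_sl_30_kth_non_overlapping
  unfold sl_30_kth_non_overlapping sl_30_kth_non_overlapping_alt
  split
  · rfl
  · rename_i h
    have h1 : sub.toList.length ≠ 0 := fun h0 => h (Or.inl h0)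
    have h2 : ¬ k < 1 := fun h0 => h (Or.inr h0)
    have hm : 0 < sub.toList.length := Nat.pos_of_ne_zero h1
    have hk : k.toNat = (k.toNat - 1) + 1 := by omega
    rw [hk]
    have h0 : ((0 : Nat) : Int) = (0 : Int) := rfl
    rw [← h0]
    exact pv_main s.toList sub.toList sub.toList.length hm rfl k (k.toNat - 1) 0 0 0
      (Nat.zero_le _) (by omega)
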